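-- pv_equiv track=rewrite | github.com/lewisjbeech/210CT | 210 CT Coursework Folder/Week 5/Basic Q1/Ascending Number.py | ConsecutiveString
-- ===== SOURCE A (Python) =====
-- def ConsecutiveString(a, pos, string):
--     if (string == []):
--         string.append(a[pos])
--         return ConsecutiveString(a, pos+1, string)
--
--     if  (pos != (len(a)-1)):
--
--         if (a[pos] > (string[-1])):
--             string.append(a[pos])
--             return ConsecutiveString(a, pos+1, string)
--         else:
--             return string
--     else:
--         if (a[pos] > (string[-1])):
--             string.append(a[pos])
--             return string
--         else:
--             return string
-- ===== SOURCE B (Python) =====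
-- def ConsecutiveString(a, pos, string):
--     i = pos
--     if not string:
--         string.append(a[i])
--         i += 1
--     while i < len(a) and a[i] > string[-1]:
--         string.append(a[i])
--         i += 1
--     return string
-- ===== Notes on version B (the rewrite author's own statement) =====
-- stated objective: simpler
-- what changed: A's three-way branched tail recursion (special-casing the last index) is replaced by a single guarded while-loop over an index that merges the interior and last-index cases into one comparison step.
-- crash fix: When the list is entered with an empty string at the last index (pos = len(a)-1, pos >= 0), or with a nonempty string at pos >= len(a), A raises IndexError after/at reading a[pos]; B's guarded loop returns the run built so far. — e.g. on ConsecutiveString([5], 0, []): A raises IndexError, B returns [5]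
import Mathlib
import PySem

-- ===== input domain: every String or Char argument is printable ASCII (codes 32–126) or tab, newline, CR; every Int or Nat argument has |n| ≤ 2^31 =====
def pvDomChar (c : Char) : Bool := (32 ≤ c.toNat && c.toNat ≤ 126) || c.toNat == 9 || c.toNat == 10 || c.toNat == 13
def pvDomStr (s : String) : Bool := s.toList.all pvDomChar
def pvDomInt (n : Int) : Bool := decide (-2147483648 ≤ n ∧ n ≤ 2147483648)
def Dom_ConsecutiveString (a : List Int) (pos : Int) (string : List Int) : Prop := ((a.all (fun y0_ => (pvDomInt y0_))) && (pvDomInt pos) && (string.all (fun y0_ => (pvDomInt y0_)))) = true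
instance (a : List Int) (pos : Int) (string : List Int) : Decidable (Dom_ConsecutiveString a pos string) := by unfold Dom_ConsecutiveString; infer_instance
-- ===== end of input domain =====

-- B replaces A's branched tail recursion by one guarded while-loop (simpler); both mutate
-- `string` in place in Python — the equivalence proved here is about the RETURN value,
-- but B performs the same in-place appends as A.

-- ===== PORT A =====
-- literal transliteration of A; where Python raises IndexError (pyGet? = none, outside
-- Pre_), the port returns `string`.
def ConsecutiveString (a : List Int) (pos : Int) (string : List Int) : List Int :=
  if string = [] then
    match h : PySem.List.pyGet? a pos with
    | none => string
    | some v => ConsecutiveString a (pos + 1) (string ++ [v])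
  else if pos ≠ (a.length : Int) - 1 then
    match h : PySem.List.pyGet? a pos with
    | none => string
    | some v =>
      if v > PySem.List.pyGetD string (-1) 0 then
        ConsecutiveString a (pos + 1) (string ++ [v])
      else string
  else
    match PySem.List.pyGet? a pos with
    | none => string
    | some v =>
      if v > PySem.List.pyGetD string (-1) 0 then string ++ [v] else string
termination_by (2 * (a.length : Int) - pos).toNat
decreasing_by
  all_goals
    have hr : PySem.Raise.InRange a.length pos := by
      by_contra hc
      rw [(PySem.List.pyGet?_eq_none_iff a pos).2 hc] at h
      exact absurd h (by simp)
    unfold PySem.Raise.InRange at hr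
    omega

-- ===== PORT B =====
-- the while-loop of Source B: `while i < len(a) and a[i] > string[-1]: append; i += 1`
def ConsecutiveStringLoop (a : List Int) (i : Int) (string : List Int) : List Int :=
  if i < (a.length : Int) then
    match h : PySem.List.pyGet? a i with
    | none => string
    | some v =>
      if v > PySem.List.pyGetD string (-1) 0 then
        ConsecutiveStringLoop a (i + 1) (string ++ [v])
      else string
  else string
termination_by ((a.length : Int) - i).toNat
decreasing_by omega

def ConsecutiveString_alt (a : List Int) (pos : Int) (string : List Int) : List Int :=
  if string = [] then
    match PySem.List.pyGet? a pos with
    | none => string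
    | some v => ConsecutiveStringLoop a (pos + 1) (string ++ [v])
  else ConsecutiveStringLoop a pos string

-- ===== PRECONDITION & SPEC =====
-- Pre_ is exactly the inputs on which A returns normally: pos a valid (possibly negative)
-- index of a, excluding the empty-string last-index call, on which A recurses past the
-- end and raises IndexError.
def Pre_ConsecutiveString (a : List Int) (pos : Int) (string : List Int) : Prop :=
  -(a.length : Int) ≤ pos ∧ pos < (a.length : Int) ∧ ¬(string = [] ∧ pos = (a.length : Int) - 1)
instance (a : List Int) (pos : Int) (string : List Int) : Decidable (Pre_ConsecutiveString a pos string) := by unfold Pre_ConsecutiveString; infer_instance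

def pvWitness_ConsecutiveString : List Int × Int × List Int := ([1, 2, 3], 0, [])

-- On these inputs A raises IndexError (reading a[pos] past the end, directly or after
-- the empty-string append) while B's guarded loop returns the run built so far;
-- proved below as ConsecutiveString_raises.
def Raises_ConsecutiveString (a : List Int) (pos : Int) (string : List Int) : Prop :=
  (string = [] ∧ pos = (a.length : Int) - 1 ∧ 0 ≤ pos) ∨ (string ≠ [] ∧ (a.length : Int) ≤ pos)
instance (a : List Int) (pos : Int) (string : List Int) : Decidable (Raises_ConsecutiveString a pos string) := by unfold Raises_ConsecutiveString; infer_instance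

def pvRaiseWitness_ConsecutiveString : List Int × Int × List Int := ([5], 0, [])
def pvRaiseWitnessOut_ConsecutiveString : List Int := [5]

def Spec_ConsecutiveString (a : List Int) (pos : Int) (string : List Int) (out : List Int) : Prop := out = ConsecutiveString_alt a pos string
instance (a : List Int) (pos : Int) (string : List Int) (out : List Int) : Decidable (Spec_ConsecutiveString a pos string out) := by unfold Spec_ConsecutiveString; infer_instance

-- ===== CLAIM (what is proved, stated in full; the proofs are below) =====
def Claim_equal_ConsecutiveString : Prop := ∀ (a : List Int) (pos : Int) (string : List Int), Dom_ConsecutiveString a pos string → Pre_ConsecutiveString a pos string → Spec_ConsecutiveString a pos string (ConsecutiveString a pos string)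
def Claim_raises_ConsecutiveString : Prop := (∀ (a : List Int) (pos : Int) (string : List Int), Dom_ConsecutiveString a pos string → Raises_ConsecutiveString a pos string → ¬ Pre_ConsecutiveString a pos string) ∧ (Dom_ConsecutiveString (pvRaiseWitness_ConsecutiveString.1) (pvRaiseWitness_ConsecutiveString.2.1) (pvRaiseWitness_ConsecutiveString.2.2) ∧ Raises_ConsecutiveString (pvRaiseWitness_ConsecutiveString.1) (pvRaiseWitness_ConsecutiveString.2.1) (pvRaiseWitness_ConsecutiveString.2.2) ∧ ConsecutiveString_alt (pvRaiseWitness_ConsecutiveString.1) (pvRaiseWitness_ConsecutiveString.2.1) (pvRaiseWitness_ConsecutiveString.2.2) = pvRaiseWitnessOut_ConsecutiveString)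

-- ===== LEMMAS AND PROOFS =====

-- On nonempty `string` with pos < len a, A's recursion computes exactly B's loop.
lemma consec_eq_loop (a : List Int) : ∀ (k : Nat) (pos : Int) (string : List Int),
    (2 * (a.length : Int) - pos).toNat ≤ k → string ≠ [] → pos < (a.length : Int) →
    ConsecutiveString a pos string = ConsecutiveStringLoop a pos string := by
  intro k
  induction k with
  | zero =>
    intro pos string hk hs hlt
    omega
  | succ k ih =>
    intro pos string hk hs hlt
    rw [ConsecutiveString, ConsecutiveStringLoop]
    simp only [if_neg hs, if_pos hlt]
    by_cases hlast : pos = (a.length : Int) - 1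
    · -- last index: A's else branch; loop's recursive call terminates immediately
      have hnn : ¬ (pos ≠ (a.length : Int) - 1) := not_not_intro hlast
      simp only [if_neg hnn]
      cases hg : PySem.List.pyGet? a pos with
      | none => rfl
      | some v =>
        by_cases hcmp : v > PySem.List.pyGetD string (-1) 0
        · simp only [if_pos hcmp]
          rw [ConsecutiveStringLoop]
          simp only [if_neg (by omega : ¬ pos + 1 < (a.length : Int))]
        · simp only [if_neg hcmp]
    · simp only [if_pos hlast]
      cases hg : PySem.List.pyGet? a pos with
      | none => rfl
      | some v =>
        by_cases hcmp : v > PySem.List.pyGetD string (-1) 0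
        · simp only [if_pos hcmp]
          exact ih (pos + 1) (string ++ [v]) (by omega) (by simp) (by omega)
        · simp only [if_neg hcmp]

-- ===== VERDICT (by name: the statement is the Claim_ definition above) =====
theorem ConsecutiveString_spec : Claim_equal_ConsecutiveString := by
  intro a pos string _ hpre
  obtain ⟨hlo, hhi, hne⟩ := hpre
  unfold Spec_ConsecutiveString ConsecutiveString_alt
  by_cases hs : string = []
  · subst hs
    rw [ConsecutiveString]
    cases hg : PySem.List.pyGet? a pos with
    | none => rfl
    | some v =>
      exact consec_eq_loop a _ (pos + 1) ([] ++ [v]) le_rfl (by simp)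
        (by simp at hne; omega)
  · simp only [if_neg hs]
    exact consec_eq_loop a _ pos string le_rfl hs hhi

theorem ConsecutiveString_raises : Claim_raises_ConsecutiveString := by
  unfold Claim_raises_ConsecutiveString
  constructor
  · intro a pos string _ hr hpre
    obtain ⟨hlo, hhi, hne⟩ := hpre
    rcases hr with ⟨h1, h2, _⟩ | ⟨_, h2⟩
    · exact hne ⟨h1, h2⟩
    · omega
  · exact ⟨by decide, by decide, by
      simp [pvRaiseWitness_ConsecutiveString, pvRaiseWitnessOut_ConsecutiveString,
            ConsecutiveString_alt, ConsecutiveStringLoop, PySem.List.pyGet?, PySem.List.pyIdx?]⟩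

-- corollary of ConsecutiveString_raises: the raise witness indeed lies outside Pre_
theorem pvRaiseWitness_not_pre_ok : ¬ Pre_ConsecutiveString pvRaiseWitness_ConsecutiveString.1 pvRaiseWitness_ConsecutiveString.2.1 pvRaiseWitness_ConsecutiveString.2.2 :=
  ConsecutiveString_raises.1 _ _ _ ConsecutiveString_raises.2.1 ConsecutiveString_raises.2.2.1
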